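-- pv_equiv track=rewrite | github.com/adkf37/DC_schools_test_score_analysis | src/data_loader.py | find_count_columns
-- ===== SOURCE A (Python) =====
-- from typing import List, Optional, Dict, Tuple
--
-- def find_count_columns(cols: List[str]) -> Dict:
--     """
--     Find columns containing count data.
--
--     Returns dict with 'count' and 'total' keys.
--     """
--     result: Dict[str, Optional[str]] = {'count': None, 'total': None}
--
--     # Exact matches first
--     if 'Count' in cols:
--         result['count'] = 'Count'
--     if 'Total Count' in cols:
--         result['total'] = 'Total Count'
--
--     # Soft search if exact match not found
--     if result['count'] is None:
--         for c in cols: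
--             cl = c.lower()
--             if 'count' in cl and 'total' not in cl:
--                 result['count'] = c
--                 break
--
--     if result['total'] is None:
--         for c in cols:
--             cl = c.lower()
--             if 'total' in cl and 'count' in cl:
--                 result['total'] = c
--                 break
--
--     return result
-- ===== SOURCE B (Python) =====
-- def find_count_columns(cols):
--     # One pass: track exact and first soft candidates, combine by priority at the end.
--     exact_count = exact_total = soft_count = soft_total = None
--     for c in cols:
--         cl = c.lower()
--         if exact_count is None and c == 'Count':
--             exact_count = c
--         if exact_total is None and c == 'Total Count':
--             exact_total = c
--         if soft_count is None and 'count' in cl and 'total' not in cl: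
--             soft_count = c
--         if soft_total is None and 'total' in cl and 'count' in cl:
--             soft_total = c
--     return {'count': exact_count if exact_count is not None else soft_count,
--             'total': exact_total if exact_total is not None else soft_total}
-- ===== Notes on version B (the rewrite author's own statement) =====
-- stated objective: alternative
-- what changed: Replaced A's two membership tests plus two separate first-match break-loops by a single pass over cols maintaining four candidate variables (exact/soft for count and total), combined by priority after the loop.
import Mathlib
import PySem

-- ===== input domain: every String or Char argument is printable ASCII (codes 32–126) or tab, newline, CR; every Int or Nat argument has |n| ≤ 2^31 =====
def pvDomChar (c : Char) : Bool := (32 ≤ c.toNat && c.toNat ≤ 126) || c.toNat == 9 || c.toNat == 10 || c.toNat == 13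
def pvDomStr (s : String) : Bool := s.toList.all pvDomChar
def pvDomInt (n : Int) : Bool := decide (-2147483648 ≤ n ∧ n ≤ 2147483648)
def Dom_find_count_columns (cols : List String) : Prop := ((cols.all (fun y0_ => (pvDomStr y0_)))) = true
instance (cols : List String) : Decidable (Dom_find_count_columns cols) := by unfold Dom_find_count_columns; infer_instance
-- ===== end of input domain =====

-- B replaces A's membership tests plus two break-loops by a single fold keeping four
-- candidates, combined by priority at the end (objective: alternative decomposition).


-- ===== PORT A =====
-- first c in cols with 'count' in c.lower() and 'total' not in c.lower()
def fccSoftCount : List String → Option String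
  | [] => none
  | c :: rest =>
    let cl := PySem.Str.lower c
    if PySem.Str.isIn "count" cl && !PySem.Str.isIn "total" cl then some c
    else fccSoftCount rest

-- first c in cols with 'total' in c.lower() and 'count' in c.lower()
def fccSoftTotal : List String → Option String
  | [] => none
  | c :: rest =>
    let cl := PySem.Str.lower c
    if PySem.Str.isIn "total" cl && PySem.Str.isIn "count" cl then some c
    else fccSoftTotal rest

def find_count_columns (cols : List String) : List (String × Option String) :=
  let count0 : Option String := if cols.contains "Count" then some "Count" else none
  let total0 : Option String := if cols.contains "Total Count" then some "Total Count" else none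
  let count1 := match count0 with
    | none => fccSoftCount cols
    | some v => some v
  let total1 := match total0 with
    | none => fccSoftTotal cols
    | some v => some v
  [("count", count1), ("total", total1)]

-- ===== PORT B =====
def fccStep (s : Option String × Option String × Option String × Option String)
    (c : String) : Option String × Option String × Option String × Option String :=
  let cl := PySem.Str.lower c
  let ec := if s.1.isNone && c == "Count" then some c else s.1
  let et := if s.2.1.isNone && c == "Total Count" then some c else s.2.1
  let sc := if s.2.2.1.isNone && (PySem.Str.isIn "count" cl && !PySem.Str.isIn "total" cl)
            then some c else s.2.2.1
  let st := if s.2.2.2.isNone && (PySem.Str.isIn "total" cl && PySem.Str.isIn "count" cl)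
            then some c else s.2.2.2
  (ec, et, sc, st)

def find_count_columns_alt (cols : List String) : List (String × Option String) :=
  let r := cols.foldl fccStep (none, none, none, none)
  [("count", r.1.orElse (fun _ => r.2.2.1)),
   ("total", r.2.1.orElse (fun _ => r.2.2.2))]

-- ===== PRECONDITION & SPEC =====
def Spec_find_count_columns (cols : List String) (out : List (String × Option String)) : Prop := out = find_count_columns_alt cols
instance (cols : List String) (out : List (String × Option String)) : Decidable (Spec_find_count_columns cols out) := by unfold Spec_find_count_columns; infer_instance

-- ===== CLAIM (what is proved, stated in full; the proofs are below) =====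
def Claim_equal_find_count_columns : Prop := ∀ (cols : List String), Dom_find_count_columns cols → Spec_find_count_columns cols (find_count_columns cols)

-- ===== LEMMAS AND PROOFS =====

def fccExactCount (l : List String) : Option String :=
  if l.contains "Count" then some "Count" else none

def fccExactTotal (l : List String) : Option String :=
  if l.contains "Total Count" then some "Total Count" else none

lemma fccFold_eq (l : List String) (s : Option String × Option String × Option String × Option String) :
    l.foldl fccStep s =
      (s.1.orElse (fun _ => fccExactCount l),
       s.2.1.orElse (fun _ => fccExactTotal l),
       s.2.2.1.orElse (fun _ => fccSoftCount l),
       s.2.2.2.orElse (fun _ => fccSoftTotal l)) := by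
  induction l generalizing s with
  | nil =>
    obtain ⟨a, b, c, d⟩ := s
    cases a <;> cases b <;> cases c <;> cases d <;>
      simp [fccExactCount, fccExactTotal, fccSoftCount, fccSoftTotal, Option.orElse]
  | cons x xs ih =>
    rw [List.foldl_cons, ih]
    obtain ⟨a, b, c, d⟩ := s
    refine Prod.ext ?_ (Prod.ext ?_ (Prod.ext ?_ ?_))
    · cases a with
      | some v => simp [fccStep, Option.orElse]
      | none =>
        by_cases h : x == "Count"
        · have hx : x = "Count" := by simpa using h
          simp [fccStep, fccExactCount, hx, Option.orElse]
        · have hx : "Count" ≠ x := fun e => h (by simp [e])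
          simp [fccStep, fccExactCount, h, hx, Option.orElse]
    · cases b with
      | some v => simp [fccStep, Option.orElse]
      | none =>
        by_cases h : x == "Total Count"
        · have hx : x = "Total Count" := by simpa using h
          simp [fccStep, fccExactTotal, hx, Option.orElse]
        · have hx : "Total Count" ≠ x := fun e => h (by simp [e])
          simp [fccStep, fccExactTotal, h, hx, Option.orElse]
    · cases c with
      | some v => simp [fccStep, Option.orElse]
      | none =>
        simp [fccStep, fccSoftCount, Option.orElse]
        split_ifs <;> simp
    · cases d with
      | some v => simp [fccStep, Option.orElse]
      | none =>
        simp [fccStep, fccSoftTotal, Option.orElse]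
        split_ifs <;> simp

-- ===== VERDICT (by name: the statement is the Claim_ definition above) =====
theorem find_count_columns_spec : Claim_equal_find_count_columns := by
  intro cols _
  unfold Spec_find_count_columns find_count_columns find_count_columns_alt
  rw [fccFold_eq]
  simp only [fccExactCount, fccExactTotal]
  by_cases h1 : "Count" ∈ cols <;> by_cases h2 : "Total Count" ∈ cols <;>
    simp [h1, h2, Option.orElse]
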